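-- pv_equiv track=rewrite | github.com/cciprianmihai/Map-Generation-From-Overlapping-Microscopy-Images-Using-Stitching-methods | full_pipeline.py | diagonal_submatrix
-- ===== SOURCE A (Python) =====
-- def diagonal_submatrix(k, x, y, image_paths):
--     matrix_size = k  # Assumes a 10x10 matrix
--     """
--     Return the k×k submatrix of a width×width grid stored in `image_paths` (row-major order),
--     starting at top-left coordinate (x, y), traversed in diagonal order.
--
--     Parameters:
--         image_paths (List[str]): Flat list of image image_paths of length width×width.
--         k (int): Size of the submatrix (k rows, k columns).
--         x (int): Row index of the submatrix's top-left corner (0-based).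
--         y (int): Column index of the submatrix's top-left corner (0-based).
--
--     Returns:
--         List[str]: The k×k submatrix's elements in diagonal order.
--     """
--     result = []
--     # There are 2k-1 diagonals, indexed by sum d = i+j from 0 to 2(k-1).
--     for d in range(2 * k - 1):
--         # For each diagonal, i goes from min(d, k-1) down to max(0, d-(k-1)).
--         start = min(d, k - 1)
--         end = max(0, d - (k - 1))
--         for i in range(start, end - 1, -1):
--             j = d - i
--             global_i = x + i
--             global_j = y + j
--             idx = global_i * matrix_size + global_j
--             result.append(image_paths[idx])
--     return result
-- ===== SOURCE B (Python) =====
-- def diagonal_submatrix(k, x, y, image_paths):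
--     # Group-by-diagonal: one scan of the k x k block (i descending so each
--     # bucket is already in A's within-diagonal order), then concatenate buckets.
--     buckets = {}
--     for i in range(k - 1, -1, -1):
--         for j in range(k):
--             buckets.setdefault(i + j, []).append(image_paths[(x + i) * k + (y + j)])
--     result = []
--     for d in range(2 * k - 1):
--         result += buckets.get(d, [])
--     return result
-- ===== Notes on version B (the rewrite author's own statement) =====
-- stated objective: alternative
-- what changed: Replaces A's per-diagonal start/end index arithmetic (outer loop over the 2k-1 diagonals, inner countdown over a computed i-interval) by a single scan of the k×k block that groups elements into buckets keyed by the diagonal index i+j (scanning i downward so each bucket is already in A's within-diagonal order), then concatenates the buckets for d = 0..2k-2.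
import Mathlib
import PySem

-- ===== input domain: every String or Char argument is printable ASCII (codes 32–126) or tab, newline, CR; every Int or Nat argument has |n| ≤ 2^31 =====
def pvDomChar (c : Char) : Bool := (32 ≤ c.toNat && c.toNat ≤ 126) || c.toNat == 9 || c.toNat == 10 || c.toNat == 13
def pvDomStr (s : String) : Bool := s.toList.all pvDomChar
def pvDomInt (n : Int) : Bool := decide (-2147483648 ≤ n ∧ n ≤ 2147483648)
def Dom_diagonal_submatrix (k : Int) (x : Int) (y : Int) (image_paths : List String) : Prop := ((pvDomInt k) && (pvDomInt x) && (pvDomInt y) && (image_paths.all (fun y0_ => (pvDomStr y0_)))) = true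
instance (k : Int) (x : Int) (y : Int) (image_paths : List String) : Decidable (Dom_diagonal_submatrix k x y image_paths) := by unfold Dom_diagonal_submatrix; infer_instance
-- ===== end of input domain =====

-- B replaces A's per-diagonal start/end index arithmetic by one scan of the k×k
-- block that groups elements into buckets keyed by the diagonal index i+j
-- (objective: alternative decomposition, same asymptotic cost).

-- ===== PORT A =====
def diagonal_submatrix (k : Int) (x : Int) (y : Int) (image_paths : List String) : List String :=
  let matrix_size := k
  (PySem.List.pyRange 0 (2 * k - 1) 1).foldl (fun result d =>
    let start := min d (k - 1)
    let end_ := max 0 (d - (k - 1))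
    (PySem.List.pyRange start (end_ - 1) (-1)).foldl (fun result i =>
      let j := d - i
      let global_i := x + i
      let global_j := y + j
      let idx := global_i * matrix_size + global_j
      result ++ [PySem.List.pyGetD image_paths idx ""]) result) []

-- ===== PORT B =====
def diagonal_submatrix_alt (k : Int) (x : Int) (y : Int) (image_paths : List String) : List String :=
  let buckets : PySem.Dict Int (List String) :=
    (PySem.List.pyRange (k - 1) (-1) (-1)).foldl (fun buckets i =>
      (PySem.List.pyRange 0 k 1).foldl (fun buckets j =>
        buckets.modify (i + j) [] (fun b => b ++ [PySem.List.pyGetD image_paths ((x + i) * k + (y + j)) ""])) buckets)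
      PySem.Dict.empty
  (PySem.List.pyRange 0 (2 * k - 1) 1).foldl (fun result d => result ++ buckets.getD d []) []

-- ===== PRECONDITION & SPEC =====
-- Pre_ excludes exactly the inputs on which the Python A raises IndexError:
-- with k > 0 the accessed flat indices range from x*k+y up to (x+k-1)*k+(y+k-1),
-- and Python accepts an index idx iff -len ≤ idx < len (negative = wraparound).
def Pre_diagonal_submatrix (k : Int) (x : Int) (y : Int) (image_paths : List String) : Prop :=
  k ≤ 0 ∨ (-(image_paths.length : Int) ≤ x * k + y ∧ (x + k - 1) * k + (y + k - 1) < (image_paths.length : Int))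
instance (k : Int) (x : Int) (y : Int) (image_paths : List String) : Decidable (Pre_diagonal_submatrix k x y image_paths) := by unfold Pre_diagonal_submatrix; infer_instance

def pvWitness_diagonal_submatrix : Int × Int × Int × List String := (2, 0, 0, ["a", "b", "c", "d"])

def Spec_diagonal_submatrix (k : Int) (x : Int) (y : Int) (image_paths : List String) (out : List String) : Prop := out = diagonal_submatrix_alt k x y image_paths
instance (k : Int) (x : Int) (y : Int) (image_paths : List String) (out : List String) : Decidable (Spec_diagonal_submatrix k x y image_paths out) := by unfold Spec_diagonal_submatrix; infer_instance

-- ===== CLAIM (what is proved, stated in full; the proofs are below) =====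
def Claim_equal_diagonal_submatrix : Prop := ∀ (k : Int) (x : Int) (y : Int) (image_paths : List String), Dom_diagonal_submatrix k x y image_paths → Pre_diagonal_submatrix k x y image_paths → Spec_diagonal_submatrix k x y image_paths (diagonal_submatrix k x y image_paths)

-- ===== LEMMAS AND PROOFS =====

-- a doubly nested append-one loop is the flatMap of the per-outer-step maps
theorem pv_foldl_inner_map {α β γ : Type} (L : List α) (g : α → List β) (e : α → β → γ) (acc : List γ) :
    L.foldl (fun acc d => (g d).foldl (fun a i => a ++ [e d i]) acc) acc
      = acc ++ L.flatMap (fun d => (g d).map (e d)) := by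
  induction L generalizing acc with
  | nil => simp
  | cons h t ih =>
      rw [List.foldl_cons, PySem.List.foldl_append_singleton_eq_map, ih,
        List.flatMap_cons, List.append_assoc]

-- a doubly nested bucket-update loop is the flat pair list folded into the dict
theorem pv_foldl_inner_modify (L : List Int) (g : Int → List Int) (key : Int → Int → Int)
    (v : Int → Int → String) (d0 : PySem.Dict Int (List String)) :
    L.foldl (fun b i => (g i).foldl (fun b j => b.modify (key i j) [] (fun bl => bl ++ [v i j])) b) d0
      = (L.flatMap (fun i => (g i).map (fun j => (key i j, v i j)))).foldl
          (fun b p => b.modify p.1 [] (fun bl => bl ++ [p.2])) d0 := by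
  induction L generalizing d0 with
  | nil => rfl
  | cons h t ih =>
      simp only [List.foldl_cons, List.flatMap_cons, List.foldl_append, ih, List.foldl_map]

-- filtering an ascending range for the unique solution of i + j = c
theorem pv_filter_pyRange_shift (a b i c : Int) :
    (PySem.List.pyRange a b 1).filter (fun j => i + j == c)
      = if a ≤ c - i ∧ c - i < b then [c - i] else [] := by
  obtain ⟨n, hn⟩ : ∃ n : Nat, (b - a).toNat = n := ⟨_, rfl⟩
  induction n generalizing a with
  | zero =>
      rw [PySem.List.pyRange_one_eq_nil (by omega), List.filter_nil, if_neg (by omega)]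
  | succ n ih =>
      rw [PySem.List.pyRange_one_cons (by omega), List.filter_cons, ih (a + 1) (by omega)]
      by_cases hc : i + a = c
      · simp only [hc, beq_self_eq_true, if_pos trivial]
        rw [if_neg (by omega), if_pos (by omega)]
        congr 1; omega
      · rw [if_neg (by simp [beq_iff_eq]; omega)]
        by_cases h2 : a + 1 ≤ c - i ∧ c - i < b
        · rw [if_pos h2, if_pos (by omega)]
        · rw [if_neg h2, if_neg (by omega)]

-- a descending scan keeping only the members of a subinterval is the descending
-- range over the intersection
theorem pv_flatMap_ite_interval {γ : Type} (f : Int → γ) (lo hi : Int) (a b : Int) :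
    (PySem.List.pyRange a b (-1)).flatMap (fun i => if lo ≤ i ∧ i ≤ hi then [f i] else [])
      = ((PySem.List.pyRange (min a hi) (max b (lo - 1)) (-1)).map f) := by
  obtain ⟨n, hn⟩ : ∃ n : Nat, (a - b).toNat = n := ⟨_, rfl⟩
  induction n generalizing a with
  | zero =>
      rw [PySem.List.pyRange_neg_one_eq_nil (by omega),
        PySem.List.pyRange_neg_one_eq_nil (by omega)]
      rfl
  | succ n ih =>
      rw [PySem.List.pyRange_neg_one_cons (by omega), List.flatMap_cons,
        ih (a - 1) (by omega)]
      by_cases hc : lo ≤ a ∧ a ≤ hi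
      · rw [if_pos hc, PySem.List.pyRange_neg_one_cons (a := min a hi) (by omega)]
        rw [List.map_cons]
        have h1 : min a hi - 1 = min (a - 1) hi := by omega
        have h2 : min a hi = a := by omega
        rw [h1, h2]
        rfl
      · rw [if_neg hc, List.nil_append]
        by_cases hhi : hi < a
        · have : min (a - 1) hi = min a hi := by omega
          rw [this]
        · have ha : a < lo := by omega
          rw [PySem.List.pyRange_neg_one_eq_nil (by omega),
            PySem.List.pyRange_neg_one_eq_nil (by omega)]

theorem pv_diag (k x y : Int) (image_paths : List String) (d : Int) :
    (((PySem.List.pyRange (k - 1) (-1) (-1)).flatMap (fun i =>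
        (PySem.List.pyRange 0 k 1).map (fun j =>
          (i + j, PySem.List.pyGetD image_paths ((x + i) * k + (y + j)) "")))).foldl
        (fun b p => b.modify p.1 [] (fun bl => bl ++ [p.2])) PySem.Dict.empty).getD d []
      = (PySem.List.pyRange (min d (k - 1)) (max 0 (d - (k - 1)) - 1) (-1)).map
          (fun i => PySem.List.pyGetD image_paths ((x + i) * k + (y + (d - i))) "") := by
  rw [PySem.Dict.getD_foldl_modify_append, PySem.Dict.getD_empty, List.nil_append,
    List.filter_flatMap, List.map_flatMap]
  have step : ∀ i : Int,
      ((((PySem.List.pyRange 0 k 1).map (fun j =>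
          (i + j, PySem.List.pyGetD image_paths ((x + i) * k + (y + j)) ""))).filter
          (fun p => p.1 == d)).map (fun p => p.2))
        = if d - k + 1 ≤ i ∧ i ≤ d then
            [PySem.List.pyGetD image_paths ((x + i) * k + (y + (d - i))) ""] else [] := by
    intro i
    rw [List.filter_map]
    have : ((PySem.List.pyRange 0 k 1).filter ((fun p => p.1 == d) ∘ (fun j =>
        (i + j, PySem.List.pyGetD image_paths ((x + i) * k + (y + j)) ""))))
        = if 0 ≤ d - i ∧ d - i < k then [d - i] else [] := pv_filter_pyRange_shift 0 k i d
    rw [this]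
    by_cases hc : d - k + 1 ≤ i ∧ i ≤ d
    · rw [if_pos (by omega), if_pos hc]; rfl
    · rw [if_neg (by omega), if_neg hc]; rfl
  calc ((PySem.List.pyRange (k - 1) (-1) (-1)).flatMap fun i =>
        ((((PySem.List.pyRange 0 k 1).map (fun j =>
          (i + j, PySem.List.pyGetD image_paths ((x + i) * k + (y + j)) ""))).filter
          (fun p => p.1 == d)).map (fun p => p.2)))
      = (PySem.List.pyRange (k - 1) (-1) (-1)).flatMap (fun i =>
          if d - k + 1 ≤ i ∧ i ≤ d then
            [PySem.List.pyGetD image_paths ((x + i) * k + (y + (d - i))) ""] else []) := by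
        exact List.flatMap_congr (fun i _ => step i)
    _ = (PySem.List.pyRange (min (k - 1) d) (max (-1) (d - k + 1 - 1)) (-1)).map
          (fun i => PySem.List.pyGetD image_paths ((x + i) * k + (y + (d - i))) "") :=
        pv_flatMap_ite_interval _ (d - k + 1) d (k - 1) (-1)
    _ = (PySem.List.pyRange (min d (k - 1)) (max 0 (d - (k - 1)) - 1) (-1)).map
          (fun i => PySem.List.pyGetD image_paths ((x + i) * k + (y + (d - i))) "") := by
        have h1 : min (k - 1) d = min d (k - 1) := min_comm _ _
        have h2 : max (-1) (d - k + 1 - 1) = max 0 (d - (k - 1)) - 1 := by omega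
        rw [h1, h2]

-- ===== VERDICT (by name: the statement is the Claim_ definition above) =====
theorem diagonal_submatrix_spec : Claim_equal_diagonal_submatrix := by
  intro k x y image_paths _ _
  unfold Spec_diagonal_submatrix diagonal_submatrix diagonal_submatrix_alt
  rw [pv_foldl_inner_map (PySem.List.pyRange 0 (2 * k - 1) 1)
    (fun d => PySem.List.pyRange (min d (k - 1)) (max 0 (d - (k - 1)) - 1) (-1))
    (fun d i => PySem.List.pyGetD image_paths ((x + i) * k + (y + (d - i))) "")]
  rw [pv_foldl_inner_modify (PySem.List.pyRange (k - 1) (-1) (-1)) (fun _ => PySem.List.pyRange 0 k 1)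
    (fun i j => i + j)
    (fun i j => PySem.List.pyGetD image_paths ((x + i) * k + (y + j)) "")]
  rw [PySem.List.foldl_append_eq_flatMap]
  simp only [List.nil_append]
  exact List.flatMap_congr (fun d _ => (pv_diag k x y image_paths d).symm)
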